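-- pv_equiv track=rewrite | github.com/atopile/atopile | src/atopile/server/domains/resolve.py | _split_path_segments
-- ===== SOURCE A (Python) =====
-- def _split_path_segments(path_part: str) -> list[str]:
--     """
--     Split an address path into segments while keeping index suffixes attached.
--
--     Examples:
--     - "FakeProcessor.core_caps[1]" -> ["FakeProcessor", "core_caps[1]"]
--     - "Foo.bar[0].baz" -> ["Foo", "bar[0]", "baz"]
--     """
--     segments: list[str] = []
--     current: list[str] = []
--     bracket_depth = 0
--
--     for char in path_part:
--         if char == "." and bracket_depth == 0:
--             if current:
--                 segments.append("".join(current))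
--                 current = []
--             continue
--
--         current.append(char)
--         if char == "[":
--             bracket_depth += 1
--         elif char == "]" and bracket_depth > 0:
--             bracket_depth -= 1
--
--     if current:
--         segments.append("".join(current))
--
--     return [segment for segment in segments if segment]
-- ===== SOURCE B (Python) =====
-- def _break_at_dot(s):
--     """Return (text before the first bracket-depth-0 dot, text after it or None)."""
--     depth = 0
--     for i, ch in enumerate(s):
--         if ch == '.' and depth == 0:
--             return s[:i], s[i + 1:]
--         if ch == '[':
--             depth += 1
--         elif ch == ']' and depth > 0:
--             depth -= 1
--     return s, None
--
--
-- def _split_path_segments(path_part):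
--     segments = []
--     rest = path_part
--     while True:
--         head, tail = _break_at_dot(rest)
--         if head:
--             segments.append(head)
--         if tail is None:
--             return segments
--         rest = tail
-- ===== Notes on version B (the rewrite author's own statement) =====
-- stated objective: alternative
-- what changed: A accumulates characters into the current segment in a single pass; B repeatedly finds the first bracket-depth-0 dot and slices the string at it (delimiter search separated from segment extraction), appending each non-empty slice.
import Mathlib
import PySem

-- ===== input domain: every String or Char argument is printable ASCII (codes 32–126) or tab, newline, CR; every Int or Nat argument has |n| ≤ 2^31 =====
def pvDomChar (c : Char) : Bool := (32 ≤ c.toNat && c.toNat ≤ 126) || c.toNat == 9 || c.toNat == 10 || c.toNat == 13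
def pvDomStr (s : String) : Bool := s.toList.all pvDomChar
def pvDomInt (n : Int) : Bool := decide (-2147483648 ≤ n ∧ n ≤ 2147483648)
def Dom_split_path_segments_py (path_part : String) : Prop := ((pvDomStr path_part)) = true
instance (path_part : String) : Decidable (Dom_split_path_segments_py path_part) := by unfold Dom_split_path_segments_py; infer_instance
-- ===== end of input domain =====

-- B separates delimiter finding from segment extraction (repeated find-first-dot + slice) instead of A's
-- single char-accumulating pass; objective: alternative decomposition, same O(n) cost.


-- ===== PORT A =====
-- One fold step of A's for-loop; state = (segments, current, bracket_depth).
def stepA (st : List String × List Char × Int) (c : Char) : List String × List Char × Int :=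
  if c = '.' ∧ st.2.2 = 0 then
    if st.2.1 ≠ [] then (st.1 ++ [String.ofList st.2.1], [], st.2.2) else st
  else
    let cur' := st.2.1 ++ [c]
    if c = '[' then (st.1, cur', st.2.2 + 1)
    else if c = ']' ∧ st.2.2 > 0 then (st.1, cur', st.2.2 - 1)
    else (st.1, cur', st.2.2)

def split_path_segments_py (path_part : String) : List String :=
  let st := path_part.toList.foldl stepA ([], [], 0)
  let segs := if st.2.1 ≠ [] then st.1 ++ [String.ofList st.2.1] else st.1
  segs.filter (fun s => decide (s ≠ ""))

-- ===== PORT B =====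
-- _break_at_dot's for-loop: scan remaining chars `cs` with depth and index i over the full string s;
-- Python's nonnegative slices s[:i] / s[i+1:] are List.take / List.drop (both clamp alike).
def breakGo (s : List Char) : List Char → Int → Nat → List Char × Option (List Char)
  | [], _, _ => (s, none)
  | c :: cs, depth, i =>
    if c = '.' ∧ depth = 0 then (s.take i, some (s.drop (i + 1)))
    else if c = '[' then breakGo s cs (depth + 1) (i + 1)
    else if c = ']' ∧ depth > 0 then breakGo s cs (depth - 1) (i + 1)
    else breakGo s cs depth (i + 1)

def breakAtDot (s : List Char) : List Char × Option (List Char) := breakGo s s 0 0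

theorem breakGo_some_lt (s : List Char) (hs : s ≠ []) :
    ∀ cs d i h t, breakGo s cs d i = (h, some t) → t.length < s.length := by
  intro cs
  induction cs with
  | nil => intro d i h t he; simp [breakGo] at he
  | cons c cs ih =>
    intro d i h t he
    by_cases h1 : c = '.' ∧ d = 0
    · simp only [breakGo, if_pos h1] at he
      have : t = s.drop (i + 1) := by cases he; rfl
      subst this
      have : 0 < s.length := List.length_pos_iff.mpr hs
      simp [List.length_drop]; omega
    · simp only [breakGo, if_neg h1] at he
      split at he
      · exact ih _ _ _ _ he
      · split at he
        · exact ih _ _ _ _ he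
        · exact ih _ _ _ _ he

-- the while-loop of _split_path_segments
def altGo (s : List Char) (segs : List String) : List String :=
  match hbd : breakAtDot s with
  | (hd, none) => if hd ≠ [] then segs ++ [String.ofList hd] else segs
  | (hd, some t) => altGo t (if hd ≠ [] then segs ++ [String.ofList hd] else segs)
termination_by s.length
decreasing_by
  have hs : s ≠ [] := by
    intro h; subst h; simp [breakAtDot, breakGo] at hbd
  exact breakGo_some_lt s hs _ _ _ _ _ hbd

def split_path_segments_py_alt (path_part : String) : List String :=
  altGo path_part.toList []

-- ===== PRECONDITION & SPEC =====
def Spec_split_path_segments_py (path_part : String) (out : List String) : Prop := out = split_path_segments_py_alt path_part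
instance (path_part : String) (out : List String) : Decidable (Spec_split_path_segments_py path_part out) := by unfold Spec_split_path_segments_py; infer_instance

-- ===== CLAIM (what is proved, stated in full; the proofs are below) =====
def Claim_equal_split_path_segments_py : Prop := ∀ (path_part : String), Dom_split_path_segments_py path_part → Spec_split_path_segments_py path_part (split_path_segments_py path_part)

-- ===== LEMMAS AND PROOFS =====

def emit (segs : List String) (cur : List Char) : List String :=
  if cur ≠ [] then segs ++ [String.ofList cur] else segs

def newDepth (c : Char) (d : Int) : Int :=
  if c = '[' then d + 1 else if c = ']' ∧ d > 0 then d - 1 else d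

-- first bracket-depth-0 dot: (chars before it, chars after it)
def firstDot : List Char → Int → Option (List Char × List Char)
  | [], _ => none
  | c :: cs, d =>
    if c = '.' ∧ d = 0 then some ([], cs)
    else
      match firstDot cs (newDepth c d) with
      | none => none
      | some (p, q) => some (c :: p, q)

def endDepth : List Char → Int → Int
  | [], d => d
  | c :: cs, d => endDepth cs (newDepth c d)

theorem firstDot_some_lt :
    ∀ (cs : List Char) (d : Int) (p q : List Char), firstDot cs d = some (p, q) → q.length < cs.length := by
  intro cs
  induction cs with
  | nil => intro d p q h; simp [firstDot] at h
  | cons c cs ih =>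
    intro d p q h
    by_cases h1 : c = '.' ∧ d = 0
    · simp only [firstDot, if_pos h1] at h
      cases h; simp
    · simp only [firstDot, if_neg h1] at h
      cases hf : firstDot cs (newDepth c d) with
      | none => rw [hf] at h; simp at h
      | some pq =>
        rw [hf] at h
        obtain ⟨p', q'⟩ := pq
        simp only [Option.some.injEq, Prod.mk.injEq] at h
        obtain ⟨hp, hq⟩ := h
        subst hq
        have := ih _ _ _ hf
        simp only [List.length_cons]
        omega

theorem foldA_eq :
    ∀ (cs : List Char) (segs : List String) (cur : List Char) (d : Int),
      cs.foldl stepA (segs, cur, d) =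
        match firstDot cs d with
        | none => (segs, cur ++ cs, endDepth cs d)
        | some (p, q) => q.foldl stepA (emit segs (cur ++ p), [], 0) := by
  intro cs
  induction cs with
  | nil => intro segs cur d; simp [firstDot, endDepth]
  | cons c cs ih =>
    intro segs cur d
    by_cases h1 : c = '.' ∧ d = 0
    · have hstep : stepA (segs, cur, d) c = (emit segs cur, [], 0) := by
        by_cases hc : cur = []
        · subst hc; simp [stepA, emit, h1.1, h1.2]
        · simp [stepA, emit, hc, h1.1, h1.2]
      simp only [List.foldl_cons, hstep, firstDot, if_pos h1]
      simp
    · have hstep : stepA (segs, cur, d) c = (segs, cur ++ [c], newDepth c d) := by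
        simp only [stepA, if_neg h1, newDepth]
        split
        · rfl
        · split
          · rfl
          · rfl
      simp only [List.foldl_cons, hstep, firstDot, if_neg h1]
      rw [ih segs (cur ++ [c]) (newDepth c d)]
      cases hf : firstDot cs (newDepth c d) with
      | none => simp [endDepth]
      | some pq => obtain ⟨p, q⟩ := pq; simp

theorem breakGo_eq (s : List Char) :
    ∀ (cs : List Char) (d : Int) (i : Nat), s = s.take i ++ cs →
      breakGo s cs d i =
        match firstDot cs d with
        | none => (s, none)
        | some (p, q) => (s.take i ++ p, some q) := by
  intro cs
  induction cs with
  | nil => intro d i hs; simp [breakGo, firstDot]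
  | cons c cs ih =>
    intro d i hs
    have hlen : (s.take i).length = i := by
      have hl := congrArg List.length hs
      simp only [List.length_append, List.length_cons, List.length_take] at hl ⊢
      omega
    have hdrop : s.drop i = c :: cs := by
      rw [hs]
      exact List.drop_left' hlen
    have hdrop1 : s.drop (i + 1) = cs := by
      have : s.drop (i + 1) = (s.drop i).drop 1 := by
        rw [List.drop_drop]
      rw [this, hdrop]; rfl
    by_cases h1 : c = '.' ∧ d = 0
    · simp only [breakGo, if_pos h1, firstDot, hdrop1]
      simp
    · have hb : breakGo s (c :: cs) d i = breakGo s cs (newDepth c d) (i + 1) := by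
        simp only [breakGo, if_neg h1, newDepth]
        split
        · rfl
        · split
          · rfl
          · rfl
      have htake : s.take (i + 1) = s.take i ++ [c] := by
        rw [List.take_add, hdrop]; rfl
      have hs' : s = s.take (i + 1) ++ cs := by
        rw [htake, List.append_assoc]
        simpa using hs
      rw [hb, ih (newDepth c d) (i + 1) hs']
      simp only [firstDot, if_neg h1]
      cases hf : firstDot cs (newDepth c d) with
      | none => simp
      | some pq =>
        obtain ⟨p, q⟩ := pq
        simp [htake]

theorem altGo_eq :
    ∀ (n : Nat) (s : List Char), s.length ≤ n → ∀ (segs : List String),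
      altGo s segs =
        emit (s.foldl stepA (segs, [], 0)).1 (s.foldl stepA (segs, [], 0)).2.1 := by
  intro n
  induction n with
  | zero =>
    intro s hsn segs
    have : s = [] := by cases s <;> simp_all
    subst this
    rw [altGo]
    simp [breakAtDot, breakGo, emit]
  | succ n ih =>
    intro s hsn segs
    have hb := breakGo_eq s s 0 0 (by simp)
    rw [foldA_eq]
    rw [altGo]
    cases hf : firstDot s 0 with
    | none =>
      rw [hf] at hb
      have hb' : breakGo s s 0 0 = (s, none) := hb
      split
      next hd heq =>
        rw [breakAtDot, hb'] at heq
        simp only [Prod.mk.injEq] at heq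
        rw [← heq.1]
        simp [emit]
      next hd t heq =>
        rw [breakAtDot, hb'] at heq
        simp at heq
    | some pq =>
      obtain ⟨p, q⟩ := pq
      rw [hf] at hb
      have hb' : breakGo s s 0 0 = (p, some q) := by rw [hb]; simp
      have hq : q.length ≤ n := by
        have := firstDot_some_lt s 0 p q hf
        omega
      split
      next hd heq =>
        rw [breakAtDot, hb'] at heq
        simp at heq
      next hd t heq =>
        rw [breakAtDot, hb'] at heq
        simp only [Prod.mk.injEq, Option.some.injEq] at heq
        obtain ⟨h1, h2⟩ := heq
        subst h1; subst h2
        rw [ih q hq]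
        simp [emit]

theorem altGo_ne_empty :
    ∀ (n : Nat) (s : List Char), s.length ≤ n → ∀ (segs : List String),
      (∀ x ∈ segs, x ≠ "") → ∀ x ∈ altGo s segs, x ≠ "" := by
  intro n
  induction n with
  | zero =>
    intro s hsn segs hsegs
    have : s = [] := by cases s <;> simp_all
    subst this
    rw [altGo]
    simp only [breakAtDot, breakGo]
    simpa using hsegs
  | succ n ih =>
    intro s hsn segs hsegs
    have hemit : ∀ (l : List Char), ∀ x ∈ (if l ≠ [] then segs ++ [String.ofList l] else segs), x ≠ "" := by
      intro l x hx
      split at hx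
      · rcases List.mem_append.mp hx with h | h
        · exact hsegs x h
        · simp only [List.mem_singleton] at h
          subst h
          intro hcon
          rename_i hl
          apply hl
          have := congrArg String.toList hcon
          simpa using this
      · exact hsegs x hx
    rw [altGo]
    have hb := breakGo_eq s s 0 0 (by simp)
    cases hf : firstDot s 0 with
    | none =>
      rw [hf] at hb
      have hb' : breakGo s s 0 0 = (s, none) := hb
      split
      next hd heq =>
        rw [breakAtDot, hb'] at heq
        simp only [Prod.mk.injEq] at heq
        rw [← heq.1]
        exact hemit s
      next hd t heq =>
        rw [breakAtDot, hb'] at heq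
        simp at heq
    | some pq =>
      obtain ⟨p, q⟩ := pq
      rw [hf] at hb
      have hb' : breakGo s s 0 0 = (p, some q) := by rw [hb]; simp
      have hq : q.length ≤ n := by
        have := firstDot_some_lt s 0 p q hf
        omega
      split
      next hd heq =>
        rw [breakAtDot, hb'] at heq
        simp at heq
      next hd t heq =>
        rw [breakAtDot, hb'] at heq
        simp only [Prod.mk.injEq, Option.some.injEq] at heq
        obtain ⟨h1, h2⟩ := heq
        subst h1; subst h2
        exact ih q hq _ (hemit p)

-- ===== VERDICT (by name: the statement is the Claim_ definition above) =====
theorem split_path_segments_py_spec : Claim_equal_split_path_segments_py := by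
  unfold Claim_equal_split_path_segments_py
  intro p _hdom
  unfold Spec_split_path_segments_py split_path_segments_py split_path_segments_py_alt
  show (emit (p.toList.foldl stepA ([], [], 0)).1 (p.toList.foldl stepA ([], [], 0)).2.1).filter
      (fun s => decide (s ≠ "")) = altGo p.toList []
  rw [← altGo_eq p.toList.length p.toList le_rfl []]
  apply List.filter_eq_self.mpr
  intro x hx
  exact decide_eq_true (altGo_ne_empty p.toList.length p.toList le_rfl [] (by simp) x hx)
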